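-- pv_equiv track=rewrite | github.com/pierrickdelrieu/Algorithme-Floyd-Warshall | src/algo_bellman.py | get_solution_bellman
-- ===== SOURCE A (Python) =====
-- def display_smallest_path_bellman(predecesseurs, init_sommet, vertice):
--     smallest_path = str(init_sommet)
--
--     # Si l'on a encore des intermédiaires (prédecesseur)
--     if predecesseurs[vertice] != init_sommet:
--         """Appel récursive de notre fonction puisque l'on doit changer le sommet final en l'intermédiaire
--         jusqu'à avoir pour sommet final la valeur du sommet initial, alors on aura notre chemin le plus court"""
--         smallest_path = display_smallest_path_bellman(predecesseurs, init_sommet, predecesseurs[vertice])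
--     return smallest_path + " -> " + str(vertice)
--
-- def get_solution_bellman(distances, predecesseurs, init_sommet):
--     """
--     Affichage des solution de l'algorithme de bellman
--     Affichage de l'ensemble des plus court chemin pour chaque sommet par rapport au sommet initial
--     """
--     array_shortest_path = []
--     for v in distances:
--         message_shortest_path = "Plus court chemin de "
--         message_shortest_path += str(init_sommet)
--         message_shortest_path += " à "
--         message_shortest_path += str(v) + " : "
--         message_shortest_path += display_smallest_path_bellman(predecesseurs, init_sommet, v)
--         message_shortest_path += " (poids = " + str(distances[v]) + ")"
--         array_shortest_path.append(message_shortest_path)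
--
--     return array_shortest_path
-- ===== SOURCE B (Python) =====
-- def get_solution_bellman(distances, predecesseurs, init_sommet):
--     """Iterative re-implementation: walk the predecessor chain with a loop,
--     collect the vertices in a list, reverse it and join with ' -> '."""
--     array_shortest_path = []
--     for v, poids in distances.items():
--         cur = v
--         path = [v]
--         while predecesseurs[cur] != init_sommet:
--             cur = predecesseurs[cur]
--             path.append(cur)
--         path.append(init_sommet)
--         chemin = " -> ".join(str(x) for x in reversed(path))
--         array_shortest_path.append(
--             "Plus court chemin de {} à {} : {} (poids = {})".format(
--                 init_sommet, v, chemin, poids))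
--     return array_shortest_path
-- ===== Notes on version B (the rewrite author's own statement) =====
-- stated objective: idiomatic
-- what changed: Replaces the recursive string-concatenating helper by an iterative predecessor walk that collects the path vertices in a list, reverses it and joins them with ' -> ', and iterates dict items instead of re-looking up distances[v].
import Mathlib
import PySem

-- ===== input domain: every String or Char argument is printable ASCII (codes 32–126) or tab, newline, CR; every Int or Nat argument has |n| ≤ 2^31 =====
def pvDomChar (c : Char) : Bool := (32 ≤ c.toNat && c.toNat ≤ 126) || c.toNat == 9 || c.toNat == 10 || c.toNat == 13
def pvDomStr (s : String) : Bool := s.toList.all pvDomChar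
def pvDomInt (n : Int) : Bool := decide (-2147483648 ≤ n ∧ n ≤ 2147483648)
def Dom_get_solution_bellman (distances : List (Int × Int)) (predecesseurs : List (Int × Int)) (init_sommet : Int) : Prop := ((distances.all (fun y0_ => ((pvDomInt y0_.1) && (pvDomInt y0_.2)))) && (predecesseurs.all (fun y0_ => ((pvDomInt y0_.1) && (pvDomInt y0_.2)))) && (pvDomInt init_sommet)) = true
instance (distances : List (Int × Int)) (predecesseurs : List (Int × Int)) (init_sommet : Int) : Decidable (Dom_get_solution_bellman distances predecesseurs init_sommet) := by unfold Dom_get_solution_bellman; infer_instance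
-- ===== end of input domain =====

-- B replaces A's recursive path-string builder by an iterative predecessor walk that collects
-- the path in a list, reverses it and joins it with " -> " (objective: idiomatic).

-- ===== PORT A =====
-- recursive helper of A; the extra Nat is fuel: fuel 0 is where Python's recursion would never
-- return (RecursionError on a predecessor cycle) — those inputs are excluded by Pre_.
def pv_display_smallest_path_bellman (predecesseurs : PySem.Dict Int Int) (init_sommet : Int) (vertice : Int) : Nat → String
  | 0 => ""
  | fuel + 1 =>
      (if predecesseurs.getD vertice 0 ≠ init_sommet then
        pv_display_smallest_path_bellman predecesseurs init_sommet (predecesseurs.getD vertice 0) fuel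
      else PySem.Int.toStr init_sommet) ++ " -> " ++ PySem.Int.toStr vertice

def get_solution_bellman (distances : List (Int × Int)) (predecesseurs : List (Int × Int)) (init_sommet : Int) : List String :=
  let d := PySem.Dict.ofList distances
  let p := PySem.Dict.ofList predecesseurs
  d.keys.foldl
    (fun acc v => acc ++
      ["Plus court chemin de " ++ PySem.Int.toStr init_sommet ++ " à " ++ PySem.Int.toStr v ++ " : " ++
        pv_display_smallest_path_bellman p init_sommet v (p.size + 1) ++
        " (poids = " ++ PySem.Int.toStr (d.getD v 0) ++ ")"]) []

-- ===== PORT B =====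
-- the while-loop of B; fuel plays the role of the loop's (proved-finite-under-Pre_) iteration bound
def pv_walk (predecesseurs : PySem.Dict Int Int) (init_sommet : Int) : Nat → Int → List Int → List Int
  | 0, _, path => path
  | fuel + 1, cur, path =>
      if predecesseurs.getD cur 0 ≠ init_sommet then
        pv_walk predecesseurs init_sommet fuel (predecesseurs.getD cur 0) (path ++ [predecesseurs.getD cur 0])
      else path

def pv_chemin (predecesseurs : PySem.Dict Int Int) (init_sommet : Int) (v : Int) : String :=
  PySem.Str.join " -> "
    (((pv_walk predecesseurs init_sommet (predecesseurs.size + 1) v [v]) ++ [init_sommet]).reverse.map PySem.Int.toStr)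

def get_solution_bellman_alt (distances : List (Int × Int)) (predecesseurs : List (Int × Int)) (init_sommet : Int) : List String :=
  let d := PySem.Dict.ofList distances
  let p := PySem.Dict.ofList predecesseurs
  d.items.map (fun vw =>
    "Plus court chemin de " ++ PySem.Int.toStr init_sommet ++ " à " ++ PySem.Int.toStr vw.1 ++ " : " ++
      pv_chemin p init_sommet vw.1 ++ " (poids = " ++ PySem.Int.toStr vw.2 ++ ")")

-- ===== PRECONDITION & SPEC =====
-- one lookup step in the predecessor dict (used only to state Pre_)
def pvStep (predecesseurs : List (Int × Int)) (x : Int) : Int :=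
  (PySem.Dict.ofList predecesseurs).getD x 0

-- Pre_ holds exactly when A returns: for every vertex of `distances` the predecessor chain stays
-- inside the keys of `predecesseurs` (no KeyError) and reaches `init_sommet` (no infinite
-- recursion / RecursionError); a terminating chain visits distinct keys, hence the bound `size`.
def Pre_get_solution_bellman (distances : List (Int × Int)) (predecesseurs : List (Int × Int)) (init_sommet : Int) : Prop :=
  ∀ v ∈ (PySem.Dict.ofList distances).keys,
    ∃ n ≤ (PySem.Dict.ofList predecesseurs).size,
      (∀ i ≤ n, (PySem.Dict.ofList predecesseurs).contains ((pvStep predecesseurs)^[i] v) = true) ∧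
      (pvStep predecesseurs)^[n+1] v = init_sommet

instance (distances : List (Int × Int)) (predecesseurs : List (Int × Int)) (init_sommet : Int) : Decidable (Pre_get_solution_bellman distances predecesseurs init_sommet) := by unfold Pre_get_solution_bellman; infer_instance

def pvWitness_get_solution_bellman : (List (Int × Int)) × (List (Int × Int)) × Int :=
  ([(0, 0), (1, 5), (2, 7)], [(0, 0), (1, 0), (2, 1)], 0)

def Spec_get_solution_bellman (distances : List (Int × Int)) (predecesseurs : List (Int × Int)) (init_sommet : Int) (out : List String) : Prop := out = get_solution_bellman_alt distances predecesseurs init_sommet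
instance (distances : List (Int × Int)) (predecesseurs : List (Int × Int)) (init_sommet : Int) (out : List String) : Decidable (Spec_get_solution_bellman distances predecesseurs init_sommet out) := by unfold Spec_get_solution_bellman; infer_instance

-- ===== CLAIM (what is proved, stated in full; the proofs are below) =====
def Claim_equal_get_solution_bellman : Prop := ∀ (distances : List (Int × Int)) (predecesseurs : List (Int × Int)) (init_sommet : Int), Dom_get_solution_bellman distances predecesseurs init_sommet → Pre_get_solution_bellman distances predecesseurs init_sommet → Spec_get_solution_bellman distances predecesseurs init_sommet (get_solution_bellman distances predecesseurs init_sommet)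

-- ===== LEMMAS AND PROOFS =====

-- Chars-level: joining a list with one more element appended (list nonempty)
theorem pv_chars_join_append_last (sep x a : List Char) (l : List (List Char)) :
    PySem.Chars.join sep ((a :: l) ++ [x]) = PySem.Chars.join sep (a :: l) ++ sep ++ x := by
  induction l generalizing a with
  | nil => simp [PySem.Chars.join_cons_cons, PySem.Chars.join_singleton]
  | cons b l ih =>
      rw [show (a :: b :: l) ++ [x] = a :: ((b :: l) ++ [x]) from rfl,
        show a :: ((b :: l) ++ [x]) = a :: b :: (l ++ [x]) from rfl,
        PySem.Chars.join_cons_cons,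
        show b :: (l ++ [x]) = (b :: l) ++ [x] from rfl, ih b, PySem.Chars.join_cons_cons]
      simp [List.append_assoc]

theorem pv_join_append_last (s x a : String) (l : List String) :
    PySem.Str.join s ((a :: l) ++ [x]) = PySem.Str.join s (a :: l) ++ s ++ x := by
  apply String.toList_inj.mp
  simp only [PySem.Str.toList_join, List.map_append, List.map_cons, List.map_nil,
    String.toList_append]
  rw [show (a.toList :: List.map String.toList l) ++ [x.toList]
      = a.toList :: (List.map String.toList l ++ [x.toList]) from rfl]
  rw [show a.toList :: (List.map String.toList l ++ [x.toList])
      = (a.toList :: List.map String.toList l) ++ [x.toList] from rfl]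
  rw [pv_chars_join_append_last]

theorem pv_join_pair (s a b : String) : PySem.Str.join s [a, b] = a ++ s ++ b := by
  apply String.toList_inj.mp
  simp [PySem.Str.toList_join, PySem.Chars.join_cons_cons, PySem.Chars.join_singleton]

-- B's loop only ever appends to `path`
theorem pv_walk_acc (p : PySem.Dict Int Int) (init : Int) :
    ∀ (fuel : Nat) (cur : Int) (path : List Int),
      pv_walk p init fuel cur path = path ++ pv_walk p init fuel cur [] := by
  intro fuel
  induction fuel with
  | zero => intro cur path; simp [pv_walk]
  | succ f ih =>
      intro cur path
      simp only [pv_walk]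
      split
      · rw [ih _ (path ++ [p.getD cur 0]), ih _ ([] ++ [p.getD cur 0]), List.append_assoc]
        simp
      · simp

-- the heart of the file: A's recursive string equals B's reversed-walk join, for any
-- fuel large enough to let the predecessor chain reach init
theorem pv_disp_eq_chemin (p : PySem.Dict Int Int) (init : Int) :
    ∀ (fuel : Nat) (v : Int), (∃ n, n < fuel ∧ (fun x => p.getD x 0)^[n+1] v = init) →
      pv_display_smallest_path_bellman p init v fuel =
        PySem.Str.join " -> "
          (((pv_walk p init fuel v [v]) ++ [init]).reverse.map PySem.Int.toStr) := by
  intro fuel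
  induction fuel with
  | zero => intro v ⟨n, hn, _⟩; omega
  | succ f ih =>
      intro v ⟨n, hn, hit⟩
      by_cases hq : p.getD v 0 = init
      · simp [pv_display_smallest_path_bellman, pv_walk, hq, pv_join_pair]
      · have hn0 : n ≠ 0 := by rintro rfl; exact hq (by simpa using hit)
        obtain ⟨m, rfl⟩ := Nat.exists_eq_succ_of_ne_zero hn0
        have hit' : (fun x => p.getD x 0)^[m+1] (p.getD v 0) = init := by
          rw [← Function.iterate_succ_apply]; exact hit
        have ihq := ih (p.getD v 0) ⟨m, by omega, hit'⟩
        rw [show pv_display_smallest_path_bellman p init v (f+1)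
            = pv_display_smallest_path_bellman p init (p.getD v 0) f ++ " -> " ++ PySem.Int.toStr v by
          simp [pv_display_smallest_path_bellman, hq]]
        rw [show pv_walk p init (f+1) v [v]
            = ([v] ++ [p.getD v 0]) ++ pv_walk p init f (p.getD v 0) [] by
          simp only [pv_walk]
          rw [if_pos hq, pv_walk_acc p init f (p.getD v 0) ([v] ++ [p.getD v 0])]]
        rw [ihq, pv_walk_acc p init f (p.getD v 0) [p.getD v 0]]
        set T := pv_walk p init f (p.getD v 0) [] with hT
        rw [show (([v] ++ [p.getD v 0]) ++ T) ++ [init]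
            = ((init :: (T.reverse ++ [p.getD v 0])) ++ [v]).reverse by simp]
        rw [show ([p.getD v 0] ++ T) ++ [init]
            = (init :: (T.reverse ++ [p.getD v 0])).reverse by simp]
        rw [List.reverse_reverse, List.reverse_reverse]
        rw [List.map_append, List.map_cons]
        rw [show List.map PySem.Int.toStr [v] = [PySem.Int.toStr v] from rfl]
        rw [pv_join_append_last]

-- ===== VERDICT (by name: the statement is the Claim_ definition above) =====
theorem get_solution_bellman_spec : Claim_equal_get_solution_bellman := by
  intro distances predecesseurs init_sommet _hDom hPre
  unfold Spec_get_solution_bellman get_solution_bellman get_solution_bellman_alt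
  simp only []
  rw [PySem.List.foldl_append_singleton_eq_map, List.nil_append]
  rw [PySem.Dict.items_eq_map_keys (PySem.Dict.ofList distances)
    (PySem.Dict.nodup_keys_ofList distances) 0, List.map_map]
  apply List.map_congr_left
  intro v hv
  obtain ⟨n, hle, _hcont, hit⟩ := hPre v hv
  have hdisp := pv_disp_eq_chemin (PySem.Dict.ofList predecesseurs) init_sommet
    ((PySem.Dict.ofList predecesseurs).size + 1) v ⟨n, by omega, hit⟩
  simp only [Function.comp]
  rw [hdisp]
  rfl
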